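-- pv_equiv track=rewrite | github.com/pypi-data/pypi-mirror-280 | packages/tla/tla-0.0.2.tar.gz/tla-0.0.2/tla/_pprint.py | _box_dimensions
-- ===== SOURCE A (Python) =====
-- def _box_dimensions(
--         string:
--             str
--         ) -> tuple[
--             int,
--             int]:
--     r"""Return width, height of `string`.
--
--     Width is the number of characters in the
--     longest line. Height is the number of lines,
--     which includes a newline (`\n`) at the end.
--     """
--     lines = string.split('\n')
--         # counts the `\n` at end
--     widths = [
--         len(line)
--         for line in lines]
--     width = max(widths)
--     height = len(lines)
--     return (
--         width,
--         height)
-- ===== SOURCE B (Python) =====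
-- def _box_dimensions(string):
--     """Single pass over the characters; no line list is built."""
--     cur = 0
--     best = 0
--     height = 1
--     for c in string:
--         if c == '\n':
--             best = max(best, cur)
--             cur = 0
--             height += 1
--         else:
--             cur += 1
--     return (max(best, cur), height)
-- ===== Notes on version B (the rewrite author's own statement) =====
-- stated objective: alternative
-- what changed: Replaces split-into-lines + list of widths + max with a single character pass maintaining the current line length, the running maximum and a newline count.
import Mathlib
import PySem

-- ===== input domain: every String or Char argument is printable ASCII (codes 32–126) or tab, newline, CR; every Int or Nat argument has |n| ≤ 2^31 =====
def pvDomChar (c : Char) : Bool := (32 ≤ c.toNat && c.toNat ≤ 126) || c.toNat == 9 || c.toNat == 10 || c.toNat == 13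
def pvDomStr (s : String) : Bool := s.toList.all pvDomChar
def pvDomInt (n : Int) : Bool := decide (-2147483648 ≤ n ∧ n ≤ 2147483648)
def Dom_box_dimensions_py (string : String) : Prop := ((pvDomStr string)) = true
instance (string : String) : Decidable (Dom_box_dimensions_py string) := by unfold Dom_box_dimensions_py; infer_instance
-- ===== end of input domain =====

-- B replaces split-into-lines + widths-list + max by one character pass (running max, newline count); alternative decomposition, same cost.


-- ===== PORT A =====
def box_dimensions_py (string : String) : Int × Int :=
  match PySem.Str.split? string "\n" with
  | none => (0, 0)   -- unreachable: the literal separator "\n" is nonempty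
  | some lines =>
    let widths := lines.map (fun line => PySem.Str.len line)
    -- `split` always yields a nonempty list, so Python's `max(widths)` never raises; `.getD 0` is unreachable
    let width := (PySem.List.max? widths (fun x => x)).getD 0
    let height := (lines.length : Int)
    (width, height)

-- ===== PORT B =====
def bdStep (acc : Int × Int × Int) (c : Char) : Int × Int × Int :=
  let (cur, best, h) := acc
  if c = '\n' then (0, max best cur, h + 1) else (cur + 1, best, h)

def box_dimensions_py_alt (string : String) : Int × Int :=
  let r := string.toList.foldl bdStep (0, 0, 1)
  (max r.2.1 r.1, r.2.2)

-- ===== PRECONDITION & SPEC =====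
def Spec_box_dimensions_py (string : String) (out : Int × Int) : Prop := out = box_dimensions_py_alt string
instance (string : String) (out : Int × Int) : Decidable (Spec_box_dimensions_py string out) := by unfold Spec_box_dimensions_py; infer_instance

-- ===== CLAIM (what is proved, stated in full; the proofs are below) =====
def Claim_equal_box_dimensions_py : Prop := ∀ (string : String), Dom_box_dimensions_py string → Spec_box_dimensions_py string (box_dimensions_py string)

-- ===== LEMMAS AND PROOFS =====

/-- Splitting on '\n', expressed as a plain structural recursion (proof helper). -/
def mySplit1 : List Char → List Char → List (List Char)
  | [], cur => [cur.reverse]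
  | c :: rest, cur => if c = '\n' then cur.reverse :: mySplit1 rest [] else mySplit1 rest (c :: cur)

lemma go_eq : ∀ (fuel : Nat) (cs cur : List Char) (acc : List (List Char)),
    cs.length < fuel →
    PySem.Chars.splitOn.go ['\n'] fuel cs cur acc = acc.reverse ++ mySplit1 cs cur := by
  intro fuel
  induction fuel with
  | zero => intro cs cur acc h; omega
  | succ f ih =>
    intro cs cur acc h
    cases cs with
    | nil => simp [PySem.Chars.splitOn.go, mySplit1]
    | cons c rest =>
      by_cases hc : c = '\n'
      · subst hc
        rw [show PySem.Chars.splitOn.go ['\n'] (f+1) ('\n' :: rest) cur acc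
              = PySem.Chars.splitOn.go ['\n'] f rest [] (cur.reverse :: acc) by
            simp [PySem.Chars.splitOn.go, List.isPrefixOf]]
        rw [ih rest [] (cur.reverse :: acc) (by simpa using Nat.lt_of_succ_lt_succ h)]
        simp [mySplit1]
      · rw [show PySem.Chars.splitOn.go ['\n'] (f+1) (c :: rest) cur acc
              = PySem.Chars.splitOn.go ['\n'] f rest (c :: cur) acc by
            simp [PySem.Chars.splitOn.go, List.isPrefixOf]
            intro h'; exact absurd h'.symm hc]
        rw [ih rest (c :: cur) acc (by simpa using Nat.lt_of_succ_lt_succ h)]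
        simp [mySplit1, hc]

lemma splitOn_eq (cs : List Char) : PySem.Chars.splitOn cs ['\n'] = mySplit1 cs [] := by
  unfold PySem.Chars.splitOn
  rw [go_eq (cs.length + 1) cs [] [] (by omega)]
  simp

lemma mySplit1_ne_nil (cs cur : List Char) : mySplit1 cs cur ≠ [] := by
  induction cs generalizing cur with
  | nil => simp [mySplit1]
  | cons c rest ih => by_cases hc : c = '\n' <;> simp [mySplit1, hc, ih]

lemma fold_inv : ∀ (cs curL : List Char) (best h : Int),
    (fun r : Int × Int × Int => (max r.2.1 r.1, r.2.2))
      (cs.foldl bdStep ((curL.length : Int), best, h))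
    = ((mySplit1 cs curL).foldl (fun a s => max a ((s.length : Int))) best,
       h + ((mySplit1 cs curL).length : Int) - 1) := by
  intro cs
  induction cs with
  | nil => intro curL best h; simp [mySplit1]
  | cons c rest ih =>
    intro curL best h
    by_cases hc : c = '\n'
    · subst hc
      have h0 : ((([] : List Char).length : Int)) = 0 := by simp
      rw [List.foldl_cons, show bdStep ((curL.length : Int), best, h) '\n'
            = (((([] : List Char).length : Int)), max best (curL.length : Int), h + 1) by
          simp [bdStep]]
      rw [ih [] (max best (curL.length : Int)) (h + 1)]
      simp [mySplit1]
      omega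
    · rw [List.foldl_cons, show bdStep ((curL.length : Int), best, h) c
            = ((((c :: curL).length : Int)), best, h) by
          simp [bdStep, hc]]
      rw [ih (c :: curL) best h]
      simp [mySplit1, hc]

-- ===== VERDICT (by name: the statement is the Claim_ definition above) =====
theorem box_dimensions_py_spec : Claim_equal_box_dimensions_py := by
  intro s _
  unfold Spec_box_dimensions_py box_dimensions_py box_dimensions_py_alt
  rw [show PySem.Str.split? s "\n"
        = some ((PySem.Chars.splitOn s.toList ['\n']).map String.ofList) by
      simp [PySem.Str.split?, PySem.Chars.split?]]
  rw [splitOn_eq]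
  obtain ⟨l, t, hlt⟩ := List.exists_cons_of_ne_nil (mySplit1_ne_nil s.toList [])
  have hinv := fold_inv s.toList [] 0 1
  simp only [List.length_nil, Nat.cast_zero, hlt] at hinv
  rw [hlt]
  apply Eq.trans ?_ hinv.symm
  have hlen : ∀ cs : List Char, PySem.Str.len (String.ofList cs) = (cs.length : Int) := by
    intro cs; simp [PySem.Str.len]
  simp only [List.map_cons, List.map_map, hlen, PySem.List.max?_id_cons,
    Option.getD_some, Prod.mk.injEq]
  constructor
  · rw [List.foldl_cons, max_eq_right (Int.natCast_nonneg _), List.foldl_map]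
    simp only [Function.comp, hlen]
  · simp
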